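-- pv_equiv track=rewrite | github.com/Adhhiiiiiiii/custom-hash-streamlit | app.py | custom_hash
-- ===== SOURCE A (Python) =====
-- def custom_hash(text, size=32):
--     if not text:
--         text = " "  # handle empty string
--
--     # Step 1: Convert to ASCII and manipulate
--     values = [ord(c) for c in text]
--
--     # Step 2: Mix ASCII values with modular arithmetic
--     mixed = []
--     for i, v in enumerate(values):
--         val = (v * (i + 3)**2 + (i * 7)) % 257
--         mixed.append(val)
--
--     # Step 3: Compress to fixed length (e.g., 32)
--     hash_arr = [0] * size
--     for i, val in enumerate(mixed):
--         hash_arr[i % size] = (hash_arr[i % size] + val) % 256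
--
--     # Step 4: Convert to hexadecimal
--     hash_hex = ''.join(f'{v:02x}' for v in hash_arr)
--     return hash_hex[:size]  # ensure fixed size
-- ===== SOURCE B (Python) =====
-- def custom_hash(text, size=32):
--     if not text:
--         text = " "  # handle empty string
--     n = len(text)
--
--     # Gather per slot: slot b collects exactly the indices i = b, b+size, b+2*size, ...
--     # sum-then-mod-256 equals the original running (acc+val)%256 fold.
--     def mix(i):
--         return (ord(text[i]) * (i + 3) ** 2 + i * 7) % 257
--
--     out = []
--     for b in range(size):
--         total = sum(mix(i) for i in range(b, n, size))
--         out.append(format(total % 256, '02x'))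
--     return ''.join(out)[:size]
-- ===== Notes on version B (the rewrite author's own statement) =====
-- stated objective: alternative
-- what changed: Replaces the scatter loop that updates hash_arr[i % size] per character by a gather: each slot b independently sums the mixed values of its residue class i = b, b+size, ... and reduces the sum mod 256, with no intermediate values/mixed/hash_arr lists.
-- outside the precondition, e.g. on custom_hash('x', 0): A raises ZeroDivisionError, B returns ''
import Mathlib
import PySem

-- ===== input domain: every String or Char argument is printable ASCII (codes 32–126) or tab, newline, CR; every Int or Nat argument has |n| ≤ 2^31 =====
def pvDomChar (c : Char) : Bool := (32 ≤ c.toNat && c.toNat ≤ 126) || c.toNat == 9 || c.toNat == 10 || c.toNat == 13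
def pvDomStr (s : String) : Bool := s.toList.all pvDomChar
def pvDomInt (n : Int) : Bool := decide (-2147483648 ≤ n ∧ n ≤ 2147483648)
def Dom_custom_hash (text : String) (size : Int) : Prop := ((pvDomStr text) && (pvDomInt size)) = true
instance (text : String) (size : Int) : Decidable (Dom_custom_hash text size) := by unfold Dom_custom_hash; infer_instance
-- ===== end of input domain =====

-- B replaces A's scatter loop (hash_arr[i % size] updated per character) by an independent
-- gather per slot: slot b sums the mixed values of its residue class i = b, b+size, … mod 256.

-- shared hex formatting helper (Python f'{v:02x}' / format(v, '02x') for 0 ≤ v < 256)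
def hexDigits : List Char := ['0','1','2','3','4','5','6','7','8','9','a','b','c','d','e','f']
def hexByte (v : Int) : List Char := [hexDigits.getD (v.toNat / 16) '0', hexDigits.getD (v.toNat % 16) '0']

-- ===== PORT A =====
def custom_hash (text : String) (size : Int) : String :=
  let t := if text = "" then " " else text
  let values : List Int := t.toList.map (fun c => (c.toNat : Int))
  let mixed : List Int := (PySem.List.enumerate values).foldl
      (fun acc p => acc ++ [PySem.Int.mod (p.2 * (p.1 + 3) ^ 2 + p.1 * 7) 257]) []
  -- indices i % size are in range under Pre_ (1 ≤ size), so pySetD/pyGetD are exact here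
  let hash_arr : List Int := (PySem.List.enumerate mixed).foldl
      (fun arr p => PySem.List.pySetD arr (PySem.Int.mod p.1 size)
          (PySem.Int.mod (PySem.List.pyGetD arr (PySem.Int.mod p.1 size) 0 + p.2) 256))
      (PySem.List.pyRepeat [(0 : Int)] size)
  let hash_hex : List Char := hash_arr.foldl (fun acc v => acc ++ hexByte v) []
  String.ofList (PySem.List.slice hash_hex none (some size))

-- ===== PORT B =====
-- mix(i) of Source B: (ord(text[i]) * (i+3)**2 + i*7) % 257 (index i in range wherever B evaluates it)
def mixAt (cs : List Char) (i : Int) : Int :=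
  PySem.Int.mod (((PySem.List.pyGetD cs i ' ').toNat : Int) * (i + 3) ^ 2 + i * 7) 257

def custom_hash_alt (text : String) (size : Int) : String :=
  let t := if text = "" then " " else text
  let cs := t.toList
  let n : Int := PySem.List.len cs
  let out : List Char := (PySem.List.pyRange 0 size).foldl
      (fun acc b => acc ++ hexByte (PySem.Int.mod (((PySem.List.pyRange b n size).map (mixAt cs)).sum) 256)) []
  String.ofList (PySem.List.slice out none (some size))

-- ===== PRECONDITION & SPEC =====
-- Pre_ excludes size ≤ 0: there A raises (ZeroDivisionError from i % 0, or IndexError on the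
-- empty hash_arr for negative size) and returns nothing.
def Pre_custom_hash (_text : String) (size : Int) : Prop := 1 ≤ size
instance (text : String) (size : Int) : Decidable (Pre_custom_hash text size) := by
  unfold Pre_custom_hash; infer_instance
def pvWitness_custom_hash : String × Int := ("abc", 32)

def Spec_custom_hash (text : String) (size : Int) (out : String) : Prop := out = custom_hash_alt text size
instance (text : String) (size : Int) (out : String) : Decidable (Spec_custom_hash text size out) := by
  unfold Spec_custom_hash; infer_instance

-- ===== CLAIM (what is proved, stated in full; the proofs are below) =====
def Claim_equal_custom_hash : Prop := ∀ (text : String) (size : Int), Dom_custom_hash text size → Pre_custom_hash text size → Spec_custom_hash text size (custom_hash text size)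

-- ===== LEMMAS AND PROOFS =====

-- peel the last index k off a stepped range: pyRange b (k+1) s gains [k] iff k ≡ b (mod s)
lemma range_step_succ (s b : Int) (hs : 0 < s) (hb0 : 0 ≤ b) (hbs : b < s) (k : Nat) :
    PySem.List.pyRange b ((k : Int) + 1) s =
      (if PySem.Int.mod (k : Int) s = b
       then PySem.List.pyRange b (k : Int) s ++ [(k : Int)]
       else PySem.List.pyRange b (k : Int) s) := by
  have hk0 : (0 : Int) ≤ (k : Int) := Int.natCast_nonneg k
  have hq0 : 0 ≤ (k : Int) / s := Int.ediv_nonneg hk0 (le_of_lt hs)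
  have hkqr : s * ((k : Int) / s) + (k : Int) % s = (k : Int) := by rw [Int.mul_ediv_add_emod]
  have hr0 : 0 ≤ (k : Int) % s := Int.emod_nonneg _ (ne_of_gt hs)
  have hrs : (k : Int) % s < s := Int.emod_lt_of_pos _ hs
  set q : Int := (k : Int) / s with hqdef
  set r : Int := (k : Int) % s with hrdef
  have hmod : PySem.Int.mod (k : Int) s = r := PySem.Int.mod_eq_emod_of_pos hs
  have hdiv : ∀ x : Int, (s * q + x) / s = q + x / s := by
    intro x
    rw [add_comm, Int.add_mul_ediv_left x q (ne_of_gt hs), add_comm]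
  have hdiv0 : ∀ x : Int, 0 ≤ x → x < s → x / s = 0 := fun x h1 h2 => Int.ediv_eq_zero_of_lt h1 h2
  have hdiv1 : ∀ x : Int, s ≤ x → x < 2 * s → x / s = 1 := by
    intro x h1 h2
    have h3 : (x - s + s * 1) / s = (x - s) / s + 1 := Int.add_mul_ediv_left _ _ (ne_of_gt hs)
    have h4 : (x - s) / s = 0 := hdiv0 _ (by omega) (by omega)
    have h5 : x - s + s * 1 = x := by ring
    rw [h5, h4] at h3
    omega
  rw [PySem.List.pyRange_of_pos b ((k : Int) + 1) hs, PySem.List.pyRange_of_pos b (k : Int) hs, hmod]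
  by_cases h : r = b
  · -- k ≡ b (mod s): one more element, namely k itself
    simp only [if_pos h]
    have hkq : (k : Int) = s * q + b := by omega
    have hble : b ≤ (k : Int) := by nlinarith
    have hcnt1 : ((k : Int) + 1 - b + s - 1) / s = q + 1 := by
      have : (k : Int) + 1 - b + s - 1 = s * q + s := by omega
      rw [this, hdiv s, hdiv1 s (le_refl s) (by omega)]
    have hcnt0 : (if b < (k : Int) then (((k : Int) - b + s - 1) / s).toNat else 0) = q.toNat := by
      by_cases hbk : b < (k : Int)
      · have : (k : Int) - b + s - 1 = s * q + (s - 1) := by omega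
        rw [if_pos hbk, this, hdiv (s - 1), hdiv0 (s - 1) (by omega) (by omega)]
        simp
      · have hq : q = 0 := by nlinarith
        rw [if_neg hbk, hq]
        simp
    rw [if_pos (by omega : b < (k : Int) + 1), hcnt1, hcnt0,
        show (q + 1).toNat = q.toNat + 1 by omega, List.range_succ, List.map_append]
    congr 1
    simp only [List.map_cons, List.map_nil]
    rw [Int.toNat_of_nonneg hq0]
    congr 1
    omega
  · -- k ≢ b (mod s): same elements
    simp only [if_neg h]
    by_cases hbk : b ≤ (k : Int)
    · have hbk' : b < (k : Int) := by
        rcases lt_or_eq_of_le hbk with h' | h'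
        · exact h'
        · exfalso; apply h; rw [hrdef, ← h', Int.emod_eq_of_lt hb0 hbs]
      rw [if_pos (by omega), if_pos hbk']
      congr 2
      have e1 : (k : Int) + 1 - b + s - 1 = s * q + (r - b + s) := by omega
      have e0 : (k : Int) - b + s - 1 = s * q + (r - b + s - 1) := by omega
      rw [e1, e0, hdiv, hdiv]
      by_cases hrb : b < r
      · rw [hdiv1 _ (by omega) (by omega), hdiv1 _ (by omega) (by omega)]
      · have hrb' : r < b := by omega
        rw [hdiv0 _ (by omega) (by omega), hdiv0 _ (by omega) (by omega)]
    · rw [if_neg (by omega), if_neg (by omega)]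

-- the scatter fold of A equals the per-slot gather array of B
lemma scatter_eq_gather (g : Int → Int) (s : Int) (hs : 0 < s) (k : Nat) :
    (PySem.List.enumerate ((PySem.List.pyRange 0 (k : Int)).map g)).foldl
      (fun arr p => PySem.List.pySetD arr (PySem.Int.mod p.1 s)
          (PySem.Int.mod (PySem.List.pyGetD arr (PySem.Int.mod p.1 s) 0 + p.2) 256))
      (PySem.List.pyRepeat [(0 : Int)] s)
    = (PySem.List.pyRange 0 s).map
        (fun b => PySem.Int.mod (((PySem.List.pyRange b (k : Int) s).map g).sum) 256) := by
  induction k with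
  | zero =>
    have h0 : PySem.List.pyRange 0 ((0 : Nat) : Int) = [] := rfl
    rw [h0]
    simp only [List.map_nil, PySem.List.enumerate_nil, List.foldl_nil, PySem.List.pyRepeat_singleton]
    have hmap : ∀ b ∈ PySem.List.pyRange 0 s,
        PySem.Int.mod (((PySem.List.pyRange b ((0 : Nat) : Int) s).map g).sum) 256 = 0 := by
      intro b hb
      have hb0 : 0 ≤ b := ((PySem.List.mem_pyRange_one).1 hb).1
      have : PySem.List.pyRange b ((0 : Nat) : Int) s = [] := by
        rw [PySem.List.pyRange_of_pos b _ hs, if_neg (by omega)]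
        simp
      rw [this]
      simp only [List.map_nil, List.sum_nil]
      decide
    rw [List.map_congr_left hmap, List.map_const', PySem.List.length_pyRange_one]
    simp
  | succ k ih =>
    have hcast : ((k + 1 : Nat) : Int) = (k : Int) + 1 := by push_cast; ring
    rw [hcast, PySem.List.pyRange_one_succ_right (Int.natCast_nonneg k), List.map_append,
        PySem.List.enumerate_append, List.foldl_append, ih]
    simp only [List.map_cons, List.map_nil, PySem.List.enumerate_cons, PySem.List.enumerate_nil,
        List.foldl_cons, List.foldl_nil, List.length_map, PySem.List.length_pyRange_one,
        Int.sub_zero, Int.toNat_natCast, zero_add]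
    have hj0 : 0 ≤ PySem.Int.mod (k : Int) s := PySem.Int.mod_nonneg _ hs
    have hjs : PySem.Int.mod (k : Int) s < s := PySem.Int.mod_lt _ hs
    rw [PySem.List.pyGetD_map_pyRange_of_nonneg _ s _ 0 hj0 hjs,
        PySem.List.pySetD_of_nonneg _ _ hj0]
    apply List.ext_getElem
    · simp [PySem.List.length_pyRange_one]
    · intro t ht1 ht2
      have hts : t < ((s : Int) - 0).toNat := by
        simpa [PySem.List.length_pyRange_one] using ht1
      have htsi : (t : Int) < s := by omega
      rw [List.getElem_set, List.getElem_map, List.getElem_map,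
          PySem.List.getElem_pyRange_one]
      simp only [zero_add]
      by_cases heq : (PySem.Int.mod (k : Int) s).toNat = t
      · have hjt : PySem.Int.mod (k : Int) s = (t : Int) := by omega
        rw [if_pos heq, range_step_succ s (t : Int) hs (Int.natCast_nonneg t) htsi k,
            if_pos hjt, List.map_append, List.sum_append]
        simp only [List.map_cons, List.map_nil, List.sum_cons, List.sum_nil, add_zero]
        rw [hjt, PySem.Int.mod_eq_emod_of_pos (by norm_num : (0:Int) < 256),
            PySem.Int.mod_eq_emod_of_pos (by norm_num : (0:Int) < 256),
            PySem.Int.mod_eq_emod_of_pos (by norm_num : (0:Int) < 256)]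
        exact Int.emod_add_emod _ _ _
      · have hjt : ¬ PySem.Int.mod (k : Int) s = (t : Int) := by omega
        rw [if_neg heq, range_step_succ s (t : Int) hs (Int.natCast_nonneg t) htsi k,
            if_neg hjt]

-- A's "mixed" list is the indexwise map of B's mix function
lemma mixed_eq_map (cs : List Char) :
    (PySem.List.enumerate (cs.map (fun c => (c.toNat : Int)))).foldl
      (fun acc p => acc ++ [PySem.Int.mod (p.2 * (p.1 + 3) ^ 2 + p.1 * 7) 257]) []
    = (PySem.List.pyRange 0 ((cs.length : Int))).map (mixAt cs) := by
  rw [PySem.List.foldl_append_singleton_eq_map]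
  rw [PySem.List.enumerate_eq_map_pyRange (cs.map (fun c => (c.toNat : Int))) ((' ' : Char).toNat : Int)]
  simp only [List.map_map, PySem.List.len_eq, List.length_map, List.nil_append]
  refine List.map_congr_left ?_
  intro j hj
  simp only [Function.comp]
  rw [show ((' ' : Char).toNat : Int) = ((fun c => ((c.toNat : Int))) ' ') from rfl,
     PySem.List.pyGetD_map (fun c => ((c.toNat : Int))) cs j ' ']
  rfl

-- ===== VERDICT (by name: the statement is the Claim_ definition above) =====
theorem custom_hash_spec : Claim_equal_custom_hash := by
  intro text size hdom hpre
  have hs : 0 < size := hpre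
  unfold Spec_custom_hash custom_hash custom_hash_alt
  simp only [PySem.List.len_eq]
  rw [mixed_eq_map, scatter_eq_gather (mixAt (if text = "" then " " else text).toList) size hs,
      PySem.List.foldl_append_eq_flatMap, PySem.List.foldl_append_eq_flatMap]
  simp [List.flatMap_map]
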